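-- pv_equiv track=rewrite | github.com/honoraapp-Daniel/HonoraTextAPI | app/chapters.py | validate_and_fix_paragraphs
-- ===== SOURCE A (Python) =====
-- def validate_and_fix_paragraphs(paragraphs: list, chapter_title: str = None) -> list:
--     """
--     Quality assurance for paragraphs.
--
--     Fixes:
--     1. Paragraphs shorter than 20 chars (merge with adjacent)
--     2. Paragraphs that don't end with . ! or ?
--     3. Single-word paragraphs
--     4. Numeric-only paragraphs
--     5. Paragraphs that are just whitespace
--
--     Args:
--         paragraphs: List of paragraph strings
--         chapter_title: Title to preserve as first paragraph
--
--     Returns: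
--         Validated and fixed list of paragraphs
--     """
--     if not paragraphs:
--         return [chapter_title] if chapter_title else []
--
--     MIN_CHARS = 20
--
--     # First, clean and filter obviously bad paragraphs
--     cleaned = []
--     for para in paragraphs:
--         if not para or not para.strip():
--             continue
--
--         para = para.strip()
--
--         # Skip if numeric only (like "1" or "42")
--         if para.replace(".", "").replace(",", "").strip().isdigit():
--             continue
--
--         # Skip if single letter/character
--         if len(para) <= 2:
--             continue
--
--         cleaned.append(para)
--
--     if not cleaned:
--         return [chapter_title] if chapter_title else []
--
--     # Merge short paragraphs with their neighbors
--     result = []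
--     buffer = ""
--
--     title_normalized = chapter_title.strip().lower() if chapter_title else ""
--
--     for i, para in enumerate(cleaned):
--         # Never merge the title
--         if para.strip().lower() == title_normalized:
--             if buffer:
--                 result.append(buffer)
--                 buffer = ""
--             result.append(para)
--             continue
--
--         # If paragraph is too short, buffer it
--         if len(para) < MIN_CHARS:
--             if buffer:
--                 buffer = buffer + " " + para
--             else:
--                 buffer = para
--         else:
--             # Paragraph is good length
--             if buffer:
--                 # Merge buffer with this paragraph
--                 result.append(buffer + " " + para)
--                 buffer = ""
--             else:
--                 result.append(para)
--
--     # Handle remaining buffer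
--     if buffer:
--         if result and result[-1].strip().lower() != title_normalized:
--             result[-1] = result[-1] + " " + buffer
--         else:
--             result.append(buffer)
--
--     return result
-- ===== SOURCE B (Python) =====
-- def validate_and_fix_paragraphs(paragraphs: list, chapter_title: str = None) -> list:
--     """Group-based rewrite: strip/filter once, then split the cleaned list into
--     maximal runs of short non-title paragraphs and join each run with its
--     terminator (a long paragraph, the title, or the previous output)."""
--     title = chapter_title.strip().lower() if chapter_title else ""
--
--     def keep(p):
--         return p and len(p) > 2 and not p.replace(".", "").replace(",", "").strip().isdigit()
--
--     cleaned = [q for q in (p.strip() for p in paragraphs) if keep(q)]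
--     if not cleaned:
--         return [chapter_title] if chapter_title else []
--
--     out = []
--     i, n = 0, len(cleaned)
--     while i < n:
--         j = i
--         while j < n and cleaned[j].lower() != title and len(cleaned[j]) < 20:
--             j += 1
--         shorts = cleaned[i:j]
--         if j == n:
--             # trailing run of shorts: glue onto the previous paragraph unless it is the title
--             tail = " ".join(shorts)
--             if out and out[-1].strip().lower() != title:
--                 out[-1] += " " + tail
--             else:
--                 out.append(tail)
--         elif cleaned[j].lower() == title:
--             if shorts:
--                 out.append(" ".join(shorts))
--             out.append(cleaned[j])
--         else:
--             out.append(" ".join(shorts + [cleaned[j]]))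
--         i = j + 1
--     return out
-- ===== Notes on version B (the rewrite author's own statement) =====
-- stated objective: alternative
-- what changed: Replaces A's buffer/flag state machine over the cleaned list by a grouping algorithm: an index-based scan that splits the cleaned paragraphs into maximal runs of short non-title paragraphs and emits each run joined (' '.join) with its terminator (a long paragraph, the title, or glued to the previous output at the end).
import Mathlib
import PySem

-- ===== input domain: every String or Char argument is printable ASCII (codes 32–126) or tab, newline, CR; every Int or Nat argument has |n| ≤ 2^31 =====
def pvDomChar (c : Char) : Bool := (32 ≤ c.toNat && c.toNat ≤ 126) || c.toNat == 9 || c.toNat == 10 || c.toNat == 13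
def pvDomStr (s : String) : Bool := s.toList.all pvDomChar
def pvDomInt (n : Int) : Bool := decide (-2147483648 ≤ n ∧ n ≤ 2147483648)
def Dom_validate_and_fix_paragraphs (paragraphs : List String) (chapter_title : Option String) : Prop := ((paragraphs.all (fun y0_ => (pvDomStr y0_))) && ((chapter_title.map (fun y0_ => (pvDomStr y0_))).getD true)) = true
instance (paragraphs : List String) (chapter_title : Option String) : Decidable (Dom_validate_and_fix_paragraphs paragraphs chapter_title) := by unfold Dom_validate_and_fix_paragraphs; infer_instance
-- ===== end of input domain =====

set_option maxHeartbeats 1000000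

-- B replaces A's buffer/flag state machine by a grouping scan: the cleaned list is split into
-- maximal runs of short non-title paragraphs and each run is ' '.join-ed with its terminator;
-- same return value, same O(n) cost.

-- shared by both ports: `para.replace(".", "").replace(",", "").strip().isdigit()`
def skipDigit (para : String) : Bool :=
  PySem.Str.strIsdigit (PySem.Str.strip (PySem.Str.replace (PySem.Str.replace para "." "") "," ""))

-- shared by both ports: `[chapter_title] if chapter_title else []` (None and "" are falsy)
def pvTitleFallback (chapter_title : Option String) : List String :=
  match chapter_title with
  | some t => if t == "" then [] else [t]
  | none => []

-- shared by both ports: `chapter_title.strip().lower() if chapter_title else ""`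
def pvTitleNorm (chapter_title : Option String) : String :=
  match chapter_title with
  | some t => if t == "" then "" else PySem.Str.lower (PySem.Str.strip t)
  | none => ""

-- ===== PORT A =====

-- body of A's first loop (`cleaned.append(...)` after the three skips)
def aCleanStep (cleaned : List String) (para : String) : List String :=
  if para == "" || PySem.Str.strip para == "" then cleaned
  else
    let para := PySem.Str.strip para
    if skipDigit para then cleaned
    else if PySem.Str.len para ≤ 2 then cleaned
    else cleaned ++ [para]

-- body of A's second loop, state = (result, buffer)
def aMergeStep (tn : String) (st : List String × String) (para : String) : List String × String :=
  let result := st.1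
  let buffer := st.2
  if PySem.Str.lower (PySem.Str.strip para) == tn then
    (if buffer ≠ "" then result ++ [buffer] ++ [para] else result ++ [para], "")
  else if PySem.Str.len para < 20 then
    (result, if buffer ≠ "" then buffer ++ " " ++ para else para)
  else if buffer ≠ "" then (result ++ [buffer ++ " " ++ para], "")
  else (result ++ [para], "")

-- A's trailing-buffer handler (the `if buffer:` block after the loop)
def afterA (tn : String) (st : List String × String) : List String :=
  if st.2 ≠ "" then
    match st.1.getLast? with
    | some last =>
        if PySem.Str.lower (PySem.Str.strip last) ≠ tn then st.1.dropLast ++ [last ++ " " ++ st.2]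
        else st.1 ++ [st.2]
    | none => st.1 ++ [st.2]
  else st.1

def validate_and_fix_paragraphs (paragraphs : List String) (chapter_title : Option String) : List String :=
  if paragraphs == [] then pvTitleFallback chapter_title
  else
    let cleaned := paragraphs.foldl aCleanStep []
    if cleaned == [] then pvTitleFallback chapter_title
    else
      let tn := pvTitleNorm chapter_title
      afterA tn (cleaned.foldl (aMergeStep tn) ([], ""))

-- ===== PORT B =====

-- B's `keep(p)`: `p and len(p) > 2 and not p.replace(...).strip().isdigit()`
def bKeep (q : String) : Bool :=
  !(q == "") && decide (2 < PySem.Str.len q) && !skipDigit q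

-- B's cleaning comprehension
def bClean (paragraphs : List String) : List String :=
  paragraphs.filterMap (fun p => let q := PySem.Str.strip p; if bKeep q then some q else none)

-- B's inner-while predicate: `cleaned[j].lower() != title and len(cleaned[j]) < 20`
def bShort (tn : String) (p : String) : Bool :=
  !(PySem.Str.lower p == tn) && decide (PySem.Str.len p < 20)

-- B's outer while loop: split off the maximal run of shorts (inner while = takeWhile/dropWhile),
-- emit it with its terminator, continue after the terminator
def bOuter (tn : String) (out : List String) (l : List String) : List String :=
  match h : l.dropWhile (bShort tn) with
  | [] =>
      if l.isEmpty then out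
      else
        let tail := PySem.Str.join " " (l.takeWhile (bShort tn))
        match out.getLast? with
        | some last =>
            if PySem.Str.lower (PySem.Str.strip last) ≠ tn then out.dropLast ++ [last ++ " " ++ tail]
            else out ++ [tail]
        | none => out ++ [tail]
  | p :: rest =>
      if PySem.Str.lower p == tn then
        bOuter tn (out ++ (if (l.takeWhile (bShort tn)).isEmpty then [] else [PySem.Str.join " " (l.takeWhile (bShort tn))]) ++ [p]) rest
      else
        bOuter tn (out ++ [PySem.Str.join " " (l.takeWhile (bShort tn) ++ [p])]) rest
termination_by l.length
decreasing_by
  all_goals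
    have h2 : (l.takeWhile (bShort tn)).length + (l.dropWhile (bShort tn)).length = l.length := by
      rw [← List.length_append, List.takeWhile_append_dropWhile]
    rw [h] at h2; simp at h2; omega

def validate_and_fix_paragraphs_alt (paragraphs : List String) (chapter_title : Option String) : List String :=
  let title := pvTitleNorm chapter_title
  let cleaned := bClean paragraphs
  if cleaned.isEmpty then pvTitleFallback chapter_title
  else bOuter title [] cleaned

-- ===== PRECONDITION & SPEC =====
def Spec_validate_and_fix_paragraphs (paragraphs : List String) (chapter_title : Option String) (out : List String) : Prop := out = validate_and_fix_paragraphs_alt paragraphs chapter_title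
instance (paragraphs : List String) (chapter_title : Option String) (out : List String) : Decidable (Spec_validate_and_fix_paragraphs paragraphs chapter_title out) := by unfold Spec_validate_and_fix_paragraphs; infer_instance

-- ===== CLAIM (what is proved, stated in full; the proofs are below) =====
def Claim_equal_validate_and_fix_paragraphs : Prop := ∀ (paragraphs : List String) (chapter_title : Option String), Dom_validate_and_fix_paragraphs paragraphs chapter_title → Spec_validate_and_fix_paragraphs paragraphs chapter_title (validate_and_fix_paragraphs paragraphs chapter_title)

-- ===== LEMMAS AND PROOFS =====

-- unfolding equations for bOuter (well-founded recursion)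
theorem bOuter_drop_nil (tn : String) (out l : List String) (h : l.dropWhile (bShort tn) = []) :
    bOuter tn out l =
      if l.isEmpty then out
      else
        match out.getLast? with
        | some last =>
            if PySem.Str.lower (PySem.Str.strip last) ≠ tn then out.dropLast ++ [last ++ " " ++ PySem.Str.join " " (l.takeWhile (bShort tn))]
            else out ++ [PySem.Str.join " " (l.takeWhile (bShort tn))]
        | none => out ++ [PySem.Str.join " " (l.takeWhile (bShort tn))] := by
  rw [bOuter]
  split
  · rfl
  · next p rest h2 => rw [h] at h2; cases h2

theorem bOuter_drop_cons (tn : String) (out l : List String) (p : String) (rest : List String)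
    (h : l.dropWhile (bShort tn) = p :: rest) :
    bOuter tn out l =
      if PySem.Str.lower p == tn then
        bOuter tn (out ++ (if (l.takeWhile (bShort tn)).isEmpty then [] else [PySem.Str.join " " (l.takeWhile (bShort tn))]) ++ [p]) rest
      else
        bOuter tn (out ++ [PySem.Str.join " " (l.takeWhile (bShort tn) ++ [p])]) rest := by
  rw [bOuter]
  split
  · next h2 => rw [h] at h2; cases h2
  · next q rest2 h2 => rw [h] at h2; cases h2; rfl

-- Python's str.strip is idempotent
theorem chars_strip_strip (s : List Char) : PySem.Chars.strip (PySem.Chars.strip s) = PySem.Chars.strip s := by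
  simp only [PySem.Chars.strip, PySem.Chars.lstrip, PySem.Chars.rstrip]
  cases h : List.dropWhile PySem.Chars.isspace s with
  | nil => simp
  | cons a t =>
    have ha : PySem.Chars.isspace a = false := by
      have hne : List.dropWhile PySem.Chars.isspace s ≠ [] := by simp [h]
      have := List.head_dropWhile_not PySem.Chars.isspace hne
      simpa [h] using this
    simp only [List.reverse_cons, List.dropWhile_append]
    by_cases he : (List.dropWhile PySem.Chars.isspace t.reverse).isEmpty
    · simp [he, ha]
    · simp [he, ha, List.dropWhile_append, List.dropWhile_idempotent]

theorem str_strip_strip (s : String) : PySem.Str.strip (PySem.Str.strip s) = PySem.Str.strip s := by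
  have h := congrArg String.ofList (chars_strip_strip s.toList)
  simpa [PySem.Str.strip] using h

theorem strip_empty : PySem.Str.strip "" = "" := by decide

-- A's cleaning pass as a simple recursive filter (one skip condition)
def cleanF : List String → List String
  | [] => []
  | raw :: rest =>
    let para := PySem.Str.strip raw
    if para == "" || skipDigit para || PySem.Str.len para ≤ 2 then cleanF rest
    else para :: cleanF rest

theorem foldl_aCleanStep : ∀ (ps : List String) (acc : List String), ps.foldl aCleanStep acc = acc ++ cleanF ps
  | [], acc => by simp [cleanF]
  | raw :: rest, acc => by
    rw [List.foldl_cons, foldl_aCleanStep rest, cleanF]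
    have hstep : aCleanStep acc raw = acc ++ (if (PySem.Str.strip raw == "" || skipDigit (PySem.Str.strip raw) || decide (PySem.Str.len (PySem.Str.strip raw) ≤ 2)) then [] else [PySem.Str.strip raw]) := by
      simp only [aCleanStep]
      by_cases h0 : raw = ""
      · subst h0; simp [strip_empty]
      · by_cases he : PySem.Str.strip raw = ""
        · simp [h0, he]
        · by_cases hd : skipDigit (PySem.Str.strip raw) = true
          · simp [h0, he, hd]
          · by_cases hl : PySem.Str.len (PySem.Str.strip raw) ≤ 2
            · replace hl : (PySem.Chars.strip raw.toList).length ≤ 2 := by simpa using hl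
              simp [h0, he, hd, hl]
            · replace hl : ¬ (PySem.Chars.strip raw.toList).length ≤ 2 := by simpa using hl
              simp [h0, he, hd, hl]
    rw [hstep]
    by_cases hc : (PySem.Str.strip raw == "" || skipDigit (PySem.Str.strip raw) || decide (PySem.Str.len (PySem.Str.strip raw) ≤ 2)) = true
    · simp only [Bool.or_eq_true, beq_iff_eq, decide_eq_true_eq] at hc
      rcases hc with (hc|hc)|hc
      · simp [hc]
      · simp [hc]
      · replace hc : (PySem.Chars.strip raw.toList).length ≤ 2 := by simpa using hc
        simp [hc]
    · simp only [Bool.or_eq_true, beq_iff_eq, decide_eq_true_eq] at hc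
      push Not at hc
      obtain ⟨⟨h1, h2⟩, h3⟩ := hc
      replace h3 : ¬ (PySem.Chars.strip raw.toList).length ≤ 2 := by simpa using h3
      simp [h1, h2, h3]

-- B's comprehension computes the same cleaned list
theorem bClean_eq_cleanF : ∀ (ps : List String), bClean ps = cleanF ps
  | [] => rfl
  | raw :: rest => by
    have ih := bClean_eq_cleanF rest
    simp only [bClean] at ih
    simp only [bClean, List.filterMap_cons]
    by_cases he : PySem.Str.strip raw = ""
    · have hk : bKeep (PySem.Str.strip raw) = false := by simp [bKeep, he]
      rw [cleanF]
      simp only [hk, Bool.false_eq_true, if_false]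
      rw [if_pos (by simp [he])]
      exact ih
    · by_cases hd : skipDigit (PySem.Str.strip raw) = true
      · have hk : bKeep (PySem.Str.strip raw) = false := by simp [bKeep, hd]
        rw [cleanF]
        simp only [hk, Bool.false_eq_true, if_false]
        rw [if_pos (by simp [hd])]
        exact ih
      · by_cases hl : PySem.Str.len (PySem.Str.strip raw) ≤ 2
        · replace hl : (PySem.Chars.strip raw.toList).length ≤ 2 := by simpa using hl
          have h2 : ¬ 2 < (PySem.Chars.strip raw.toList).length := by omega
          have hk : bKeep (PySem.Str.strip raw) = false := by simp [bKeep, h2]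
          rw [cleanF]
          simp only [hk, Bool.false_eq_true, if_false]
          rw [if_pos (by simp [hl])]
          exact ih
        · replace hl : ¬ (PySem.Chars.strip raw.toList).length ≤ 2 := by simpa using hl
          have h2 : 2 < (PySem.Chars.strip raw.toList).length := Nat.lt_of_not_le hl
          have hk : bKeep (PySem.Str.strip raw) = true := by simp [bKeep, he, hd, h2]
          rw [cleanF]
          simp only [hk, if_true]
          rw [if_neg (by simp [he, hd, hl])]
          rw [ih]
-- every cleaned paragraph is a fixed point of strip and nonempty
theorem cleanF_prop (ps : List String) : ∀ p ∈ cleanF ps, PySem.Str.strip p = p ∧ p ≠ "" := by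
  induction ps with
  | nil => simp [cleanF]
  | cons raw rest ih =>
    rw [cleanF]
    by_cases hc : (PySem.Str.strip raw == "" || skipDigit (PySem.Str.strip raw) || decide (PySem.Str.len (PySem.Str.strip raw) ≤ 2)) = true
    · rw [if_pos hc]; exact ih
    · rw [if_neg hc]
      intro p hp
      rcases List.mem_cons.mp hp with hp | hp
      · subst hp
        simp only [Bool.or_eq_true, beq_iff_eq, decide_eq_true_eq, not_or] at hc
        exact ⟨str_strip_strip raw, hc.1.1⟩
      · exact ih p hp

-- string extensionality via toList
theorem str_ext {a b : String} (h : a.toList = b.toList) : a = b := by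
  have := congrArg String.ofList h
  simpa using this

-- A's buffer chain as a function of the buffered run
def jn : List String → String
  | [] => ""
  | [p] => p
  | p :: q :: rest => p ++ " " ++ jn (q :: rest)

theorem join_eq_jn : ∀ (l : List String), PySem.Str.join " " l = jn l
  | [] => by decide
  | [p] => by
    apply str_ext
    simp [PySem.Str.toList_join, PySem.Chars.join, jn, List.intercalate]
  | p :: q :: rest => by
    apply str_ext
    have ih := congrArg String.toList (join_eq_jn (q :: rest))
    simp only [PySem.Str.toList_join, PySem.Chars.join] at ih ⊢
    have hstep : " ".toList.intercalate (List.map String.toList (p :: q :: rest)) =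
        p.toList ++ ' ' :: " ".toList.intercalate (List.map String.toList (q :: rest)) := by
      simp [List.intercalate, List.intersperse]
    rw [hstep, ih]
    show _ = (p ++ " " ++ jn (q :: rest)).toList
    simp [String.toList_append]

theorem jn_ne_empty : ∀ (l : List String), l ≠ [] → (∀ s ∈ l, s ≠ "") → jn l ≠ ""
  | [], h, _ => absurd rfl h
  | [p], _, hs => by simpa [jn] using hs p (by simp)
  | p :: q :: rest, _, _ => by
    intro h
    have := congrArg String.toList h
    simp [jn, String.toList_append] at this

theorem jn_snoc (l : List String) (p : String) (hne : ∀ s ∈ l, s ≠ "") :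
    jn (l ++ [p]) = if jn l ≠ "" then jn l ++ " " ++ p else p := by
  induction l with
  | nil => simp [jn]
  | cons a t ih =>
    have ha : a ≠ "" := hne a (by simp)
    have ht : ∀ s ∈ t, s ≠ "" := fun s hs => hne s (by simp [hs])
    cases t with
    | nil => simp [jn, ha]
    | cons b u =>
      have hj : jn (a :: b :: u) ≠ "" := jn_ne_empty _ (by simp) hne
      have hbu : jn (b :: u) ≠ "" := jn_ne_empty _ (by simp) ht
      rw [if_pos hj]
      show jn (a :: ((b :: u) ++ [p])) = _
      rw [show (b :: u) ++ [p] = b :: (u ++ [p]) by simp]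
      show a ++ " " ++ jn (b :: (u ++ [p])) = a ++ " " ++ jn (b :: u) ++ " " ++ p
      rw [show b :: (u ++ [p]) = (b :: u) ++ [p] by simp, ih ht, if_pos hbu]
      apply str_ext
      simp [String.toList_append]

-- takeWhile/dropWhile through a prefix on which the predicate holds
theorem tw_app {α : Type} (p : α → Bool) : ∀ (u l : List α), (∀ s ∈ u, p s = true) →
    (u ++ l).takeWhile p = u ++ l.takeWhile p
  | [], l, _ => by simp
  | a :: t, l, h => by
    have ha := h a (by simp)
    simp [List.takeWhile_cons, ha, tw_app p t l (fun s hs => h s (by simp [hs]))]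

theorem dw_app {α : Type} (p : α → Bool) : ∀ (u l : List α), (∀ s ∈ u, p s = true) →
    (u ++ l).dropWhile p = l.dropWhile p
  | [], l, _ => by simp
  | a :: t, l, h => by
    have ha := h a (by simp)
    simp [List.dropWhile_cons, ha, dw_app p t l (fun s hs => h s (by simp [hs]))]

-- the core equivalence: A's merge fold + trailing handler = B's grouping scan
theorem merge_eq (tn : String) : ∀ (l : List String), (∀ p ∈ l, PySem.Str.strip p = p ∧ p ≠ "") →
    ∀ (out shorts : List String), (∀ s ∈ shorts, bShort tn s = true ∧ s ≠ "") →
    afterA tn (l.foldl (aMergeStep tn) (out, jn shorts)) = bOuter tn out (shorts ++ l)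
  | [], _, out, shorts, hsh => by
    rw [List.foldl_nil, List.append_nil]
    have hdw : shorts.dropWhile (bShort tn) = [] :=
      List.dropWhile_eq_nil_iff.mpr (fun x hx => (hsh x hx).1)
    rw [bOuter_drop_nil tn out shorts hdw]
    cases hse : shorts with
    | nil => simp [afterA, jn]
    | cons a t =>
      have hne : jn (a :: t) ≠ "" :=
        jn_ne_empty _ (by simp) (fun s hs => (hsh s (hse ▸ hs)).2)
      have htw : List.takeWhile (bShort tn) (a :: t) = a :: t := by
        have := tw_app (bShort tn) (a :: t) [] (fun s hs => (hsh s (hse ▸ hs)).1)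
        simpa using this
      simp only [afterA]
      rw [if_pos hne, htw, join_eq_jn]
      simp
  | p :: rest, hl, out, shorts, hsh => by
    have hp := hl p (by simp)
    have hrest : ∀ q ∈ rest, PySem.Str.strip q = q ∧ q ≠ "" := fun q hq => hl q (by simp [hq])
    have hshb : ∀ s ∈ shorts, bShort tn s = true := fun s hs => (hsh s hs).1
    have hshne : ∀ s ∈ shorts, s ≠ "" := fun s hs => (hsh s hs).2
    rw [List.foldl_cons]
    by_cases htit : PySem.Str.lower p = tn
    · -- title paragraph: flush the run, emit the title
      have hps : bShort tn p = false := by simp [bShort, htit]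
      have hdw : (shorts ++ p :: rest).dropWhile (bShort tn) = p :: rest := by
        rw [dw_app (bShort tn) shorts _ hshb, List.dropWhile_cons, if_neg (by simp [hps])]
      have htw : (shorts ++ p :: rest).takeWhile (bShort tn) = shorts := by
        rw [tw_app (bShort tn) shorts _ hshb, List.takeWhile_cons, if_neg (by simp [hps])]
        simp
      rw [bOuter_drop_cons tn out _ p rest hdw, if_pos (by simp [htit]), htw]
      cases shorts with
      | nil =>
        have hstep : aMergeStep tn (out, jn []) p = (out ++ [p], "") := by
          simp only [aMergeStep, hp.1, jn]
          rw [if_pos (by simp [htit])]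
          simp
        rw [hstep]
        have hrec := merge_eq tn rest hrest (out ++ [p]) [] (by simp)
        rw [show jn [] = "" from rfl] at hrec
        rw [hrec, List.nil_append]
        simp
      | cons a t =>
        have hne : jn (a :: t) ≠ "" := jn_ne_empty _ (by simp) hshne
        have hstep : aMergeStep tn (out, jn (a :: t)) p = (out ++ [jn (a :: t)] ++ [p], "") := by
          simp only [aMergeStep, hp.1]
          rw [if_pos (by simp [htit]), if_pos hne]
        rw [hstep]
        have hrec := merge_eq tn rest hrest (out ++ [jn (a :: t)] ++ [p]) [] (by simp)
        rw [show jn [] = "" from rfl] at hrec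
        rw [hrec, List.nil_append, join_eq_jn]
        simp
    · by_cases hlen : PySem.Str.len p < 20
      · -- short paragraph: extend the run
        have hlenN : p.length < 20 := by simpa using hlen
        have hps : bShort tn p = true := by simp [bShort, htit, hlenN]
        have hstep : aMergeStep tn (out, jn shorts) p = (out, jn (shorts ++ [p])) := by
          simp only [aMergeStep, hp.1]
          rw [if_neg (by simp [htit]), if_pos hlen, jn_snoc shorts p hshne]
        rw [hstep]
        have hrec := merge_eq tn rest hrest out (shorts ++ [p])
          (by intro s hs
              rcases List.mem_append.1 hs with h | h
              · exact hsh s h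
              · simp only [List.mem_singleton] at h; subst h; exact ⟨hps, hp.2⟩)
        rw [List.append_assoc, List.singleton_append] at hrec
        exact hrec
      · -- long paragraph: emit the run joined with it
        have hlenN : ¬ p.length < 20 := by simpa using hlen
        have hps : bShort tn p = false := by simp [bShort, hlenN]
        have hstep : aMergeStep tn (out, jn shorts) p = (out ++ [jn (shorts ++ [p])], "") := by
          simp only [aMergeStep, hp.1]
          rw [if_neg (by simp [htit]), if_neg hlen, jn_snoc shorts p hshne]
          by_cases hb : jn shorts = "" <;> simp [hb]
        rw [hstep]
        have hrec := merge_eq tn rest hrest (out ++ [jn (shorts ++ [p])]) [] (by simp)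
        rw [show jn [] = "" from rfl] at hrec
        rw [hrec, List.nil_append]
        have hdw : (shorts ++ p :: rest).dropWhile (bShort tn) = p :: rest := by
          rw [dw_app (bShort tn) shorts _ hshb, List.dropWhile_cons, if_neg (by simp [hps])]
        have htw : (shorts ++ p :: rest).takeWhile (bShort tn) = shorts := by
          rw [tw_app (bShort tn) shorts _ hshb, List.takeWhile_cons, if_neg (by simp [hps])]
          simp
        rw [bOuter_drop_cons tn out _ p rest hdw, if_neg (by simp [htit]), htw, join_eq_jn]

-- ===== VERDICT (by name: the statement is the Claim_ definition above) =====
theorem validate_and_fix_paragraphs_spec : Claim_equal_validate_and_fix_paragraphs := by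
  intro paragraphs chapter_title _
  show _ = _
  simp only [validate_and_fix_paragraphs, validate_and_fix_paragraphs_alt,
    foldl_aCleanStep, List.nil_append, bClean_eq_cleanF]
  by_cases hp : paragraphs = []
  · subst hp; simp [cleanF]
  · rw [if_neg (by simpa using hp)]
    cases hc : cleanF paragraphs with
    | nil => simp
    | cons c cs =>
      rw [if_neg (by simp), if_neg (by simp)]
      have := merge_eq (pvTitleNorm chapter_title) (cleanF paragraphs) (cleanF_prop paragraphs)
        [] [] (by simp)
      rw [show jn [] = "" from rfl] at this
      rw [hc] at this
      simpa using this
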